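-- pv_equiv track=rewrite | github.com/baranmcl/HackerRank_Solutions | Algorithms/Strings/Alternating_Characters/Alternating_Characters.py | altchar
-- ===== SOURCE A (Python) =====
-- def altchar(x):
--     answer = 0
--     poop = []
--     i = 0
--     g = 1
--     for letter in x:
--         poop.append(letter)
--     while g < len(poop):
--         if poop[i] == poop[g]:
--             answer = answer + 1
--             g = g + 1
--         else:
--             i = g
--             g = g + 1
--     return answer
-- ===== SOURCE B (Python) =====
-- def altchar(x):
--     # deletions needed = total length minus the number of maximal runs
--     if not x:
--         return 0
--     runs = 1 + sum(1 for a, b in zip(x, x[1:]) if a != b)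
--     return len(x) - runs
-- ===== Notes on version B (the rewrite author's own statement) =====
-- stated objective: simpler
-- what changed: B reframes the answer as length minus the number of maximal runs (one run per boundary where adjacent characters differ), instead of A's list-building plus two-index while loop counting equal comparisons.
import Mathlib
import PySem

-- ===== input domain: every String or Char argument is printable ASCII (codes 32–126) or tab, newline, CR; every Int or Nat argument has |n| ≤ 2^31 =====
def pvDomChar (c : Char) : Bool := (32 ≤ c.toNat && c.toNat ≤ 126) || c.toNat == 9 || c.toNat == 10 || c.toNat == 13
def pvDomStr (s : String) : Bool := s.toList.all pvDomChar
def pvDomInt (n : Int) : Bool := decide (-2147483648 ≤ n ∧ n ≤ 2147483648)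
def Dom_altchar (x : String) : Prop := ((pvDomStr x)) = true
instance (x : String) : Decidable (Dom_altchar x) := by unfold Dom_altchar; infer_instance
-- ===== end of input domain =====

-- B computes the answer as length minus number of maximal runs; same value, plainer decomposition.

-- ===== PORT A =====
-- the 'while g < len(poop)' loop with state (answer, i, g)
def altcharLoop (poop : List Char) (answer : Int) (i g : Nat) : Int :=
  if g < poop.length then
    if poop[i]! = poop[g]! then
      altcharLoop poop (answer + 1) i (g + 1)
    else
      altcharLoop poop answer g (g + 1)
  else answer
termination_by poop.length - g

def altchar (x : String) : Int :=
  -- 'for letter in x: poop.append(letter)' builds the character list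
  let poop := x.toList
  altcharLoop poop 0 0 1

-- ===== PORT B =====
def altchar_alt (x : String) : Int :=
  let l := x.toList
  if l = [] then 0
  else
    let runs : Int := 1 + ((l.zip l.tail).countP (fun p => p.1 != p.2) : Int)
    (l.length : Int) - runs

-- ===== PRECONDITION & SPEC =====
def Spec_altchar (x : String) (out : Int) : Prop := out = altchar_alt x
instance (x : String) (out : Int) : Decidable (Spec_altchar x out) := by unfold Spec_altchar; infer_instance

-- ===== CLAIM (what is proved, stated in full; the proofs are below) =====
def Claim_equal_altchar : Prop := ∀ (x : String), Dom_altchar x → Spec_altchar x (altchar x)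

-- ===== LEMMAS AND PROOFS =====

-- number of equal adjacent pairs, the quantity A's loop accumulates
def eqPairs : List Char → Int
  | a :: b :: rest => (if a = b then 1 else 0) + eqPairs (b :: rest)
  | _ => 0

theorem eqPairs_short (l : List Char) (h : l.length ≤ 1) : eqPairs l = 0 := by
  match l with
  | [] => rfl
  | [_] => rfl
  | _ :: _ :: _ => simp at h

theorem altcharLoop_eq (poop : List Char) :
    ∀ n k i ans, n = poop.length - (k + 1) → i < poop.length → k < poop.length →
      poop[i]! = poop[k]! →
      altcharLoop poop ans i (k + 1) = ans + eqPairs (poop.drop k) := by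
  intro n
  induction n with
  | zero =>
    intro k i ans hn _ hk _
    rw [altcharLoop]
    have : ¬ k + 1 < poop.length := by omega
    rw [if_neg this]
    have : (poop.drop k).length ≤ 1 := by
      rw [List.length_drop]; omega
    rw [eqPairs_short _ this]; ring
  | succ m ih =>
    intro k i ans hn hi hk hinv
    have hlt : k + 1 < poop.length := by omega
    have hdrop : poop.drop k = poop[k] :: poop.drop (k+1) := List.drop_eq_getElem_cons hk
    have hdrop2 : poop.drop (k+1) = poop[k+1] :: poop.drop (k+2) := List.drop_eq_getElem_cons hlt
    have hEq : eqPairs (poop.drop k) =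
        (if poop[k] = poop[k+1] then 1 else 0) + eqPairs (poop.drop (k+1)) := by
      rw [hdrop, hdrop2, eqPairs, ← hdrop2]
    rw [altcharLoop, if_pos hlt]
    by_cases hc : poop[i]! = poop[k+1]!
    · rw [if_pos hc]
      rw [ih (k+1) i (ans+1) (by omega) hi hlt hc]
      have hpg : poop[k] = poop[k+1] := by
        have h1 := hinv.symm.trans hc
        rw [getElem!_pos poop k hk, getElem!_pos poop (k+1) hlt] at h1
        exact h1
      rw [hEq, if_pos hpg]
      ring
    · rw [if_neg hc]
      rw [ih (k+1) (k+1) ans (by omega) hlt hlt rfl]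
      have hpg : ¬ poop[k] = poop[k+1] := by
        intro h
        apply hc
        rw [hinv, getElem!_pos poop k hk, getElem!_pos poop (k+1) hlt, h]
      rw [hEq, if_neg hpg]
      ring

theorem altchar_eq_eqPairs (x : String) : altchar x = eqPairs x.toList := by
  unfold altchar
  match h : x.toList with
  | [] =>
    rw [altcharLoop]
    simp [eqPairs]
  | a :: rest =>
    rw [altcharLoop_eq (a :: rest) ((a :: rest).length - 1) 0 0 0 rfl (by simp) (by simp) rfl]
    simp

theorem eqPairs_plus_count (l : List Char) (hne : l ≠ []) :
    eqPairs l + ((l.zip l.tail).countP (fun p => p.1 != p.2) : Int) = (l.length : Int) - 1 := by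
  induction l with
  | nil => exact absurd rfl hne
  | cons a rest ih =>
    match rest with
    | [] => simp [eqPairs]
    | b :: rest' =>
      have ih' := ih (by simp)
      rw [eqPairs]
      simp only [List.tail_cons, List.zip_cons_cons, List.countP_cons] at *
      by_cases hab : a = b
      · simp [hab] at *
        omega
      · simp [hab] at *
        omega

-- ===== VERDICT (by name: the statement is the Claim_ definition above) =====
theorem altchar_spec : Claim_equal_altchar := by
  intro x _
  unfold Spec_altchar altchar_alt
  rw [altchar_eq_eqPairs]
  by_cases h : x.toList = []
  · simp [h, eqPairs]
  · have hpc := eqPairs_plus_count x.toList h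
    simp only [h, if_false]
    omega
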